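-- pv_equiv track=rewrite | github.com/artisan1218/BFR-Clustering | bfr.py | groupPointsByCluster
-- ===== SOURCE A (Python) =====
-- def groupPointsByCluster(k, cluster_result):
--     points_cluster_list = list()
--     for kth in range(k):
--         l = list(filter(lambda pair:pair[1]==kth, cluster_result))
--         if len(l)!=0:
--             points_cluster_list.append(l)
--     points_cluster_list = sorted(points_cluster_list, key=lambda cluster:len(cluster))
--     return points_cluster_list
-- ===== SOURCE B (Python) =====
-- def groupPointsByCluster(k, cluster_result):
--     buckets = {}
--     for pair in cluster_result:
--         buckets.setdefault(pair[1], []).append(pair)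
--     groups = [buckets[kth] for kth in range(k) if kth in buckets]
--     groups.sort(key=len)
--     return groups
-- ===== Notes on version B (the rewrite author's own statement) =====
-- stated objective: faster
-- what changed: B buckets the points into a dict in one pass over the data and then just looks each cluster id up, instead of re-filtering the whole point list once per cluster id.
import Mathlib
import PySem

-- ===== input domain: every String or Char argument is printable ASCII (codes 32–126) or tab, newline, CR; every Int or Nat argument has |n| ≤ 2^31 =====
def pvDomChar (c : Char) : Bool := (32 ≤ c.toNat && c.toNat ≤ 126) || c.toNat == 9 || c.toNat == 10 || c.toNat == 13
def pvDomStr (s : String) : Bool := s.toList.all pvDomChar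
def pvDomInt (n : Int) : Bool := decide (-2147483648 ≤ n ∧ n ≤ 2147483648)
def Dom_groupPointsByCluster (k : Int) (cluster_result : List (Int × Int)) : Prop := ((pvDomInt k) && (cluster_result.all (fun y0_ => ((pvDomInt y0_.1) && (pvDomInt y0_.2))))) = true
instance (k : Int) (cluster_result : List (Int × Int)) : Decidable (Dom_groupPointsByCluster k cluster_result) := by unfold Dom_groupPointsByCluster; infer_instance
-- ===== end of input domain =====

-- B replaces A's per-cluster-id re-filtering of the whole point list by one dict-bucketing
-- pass over the points followed by per-id lookups (objective: faster).

-- ===== PORT A =====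
def groupPointsByCluster (k : Int) (cluster_result : List (Int × Int)) : List (List (Int × Int)) :=
  PySem.List.sorted
    ((PySem.List.pyRange 0 k 1).foldl
      (fun acc kth =>
        let l := cluster_result.filter (fun pair => pair.2 == kth)
        if l.length ≠ 0 then acc ++ [l] else acc) [])
    (fun cluster => (cluster.length : Int)) false

-- ===== PORT B =====
-- buckets.setdefault(pair[1], []).append(pair) for each pair
def pvBuckets (cluster_result : List (Int × Int)) : PySem.Dict Int (List (Int × Int)) :=
  cluster_result.foldl (fun d pair => d.modify pair.2 [] (· ++ [pair])) PySem.Dict.empty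

def groupPointsByCluster_alt (k : Int) (cluster_result : List (Int × Int)) : List (List (Int × Int)) :=
  let buckets := pvBuckets cluster_result
  let groups := (PySem.List.pyRange 0 k 1).foldl
    (fun acc kth => if buckets.contains kth then acc ++ [buckets.getD kth []] else acc) []
  PySem.List.sorted groups (fun cluster => (cluster.length : Int)) false

-- ===== PRECONDITION & SPEC =====
def Spec_groupPointsByCluster (k : Int) (cluster_result : List (Int × Int)) (out : List (List (Int × Int))) : Prop := out = groupPointsByCluster_alt k cluster_result
instance (k : Int) (cluster_result : List (Int × Int)) (out : List (List (Int × Int))) : Decidable (Spec_groupPointsByCluster k cluster_result out) := by unfold Spec_groupPointsByCluster; infer_instance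

-- ===== CLAIM (what is proved, stated in full; the proofs are below) =====
def Claim_equal_groupPointsByCluster : Prop := ∀ (k : Int) (cluster_result : List (Int × Int)), Dom_groupPointsByCluster k cluster_result → Spec_groupPointsByCluster k cluster_result (groupPointsByCluster k cluster_result)

-- ===== LEMMAS AND PROOFS =====

theorem pv_foldl_congr {α β : Type} (l : List β) (i : α) (f g : α → β → α)
    (h : ∀ a b, f a b = g a b) : l.foldl f i = l.foldl g i := by
  have hfg : f = g := funext fun a => funext fun b => h a b
  rw [hfg]

theorem pvBuckets_getD (l : List (Int × Int)) (d : PySem.Dict Int (List (Int × Int))) (kth : Int) :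
    (l.foldl (fun d pair => d.modify pair.2 [] (· ++ [pair])) d).getD kth [] =
      d.getD kth [] ++ l.filter (fun pair => pair.2 == kth) := by
  induction l generalizing d with
  | nil => simp
  | cons p l ih =>
    simp only [List.foldl_cons, ih, PySem.Dict.getD_modify, List.filter_cons]
    by_cases h : p.2 = kth
    · simp [h]
    · simp [h, Ne.symm h]

theorem pvBuckets_contains (l : List (Int × Int)) (d : PySem.Dict Int (List (Int × Int))) (kth : Int) :
    (l.foldl (fun d pair => d.modify pair.2 [] (· ++ [pair])) d).contains kth =
      (d.contains kth || l.any (fun pair => pair.2 == kth)) := by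
  induction l generalizing d with
  | nil => simp
  | cons p l ih =>
    simp only [List.foldl_cons, ih, PySem.Dict.contains_modify, List.any_cons]
    by_cases h : kth = p.2
    · simp [h]
    · simp [beq_eq_false_iff_ne.mpr h, beq_eq_false_iff_ne.mpr (Ne.symm h)]

theorem groupPointsByCluster_spec_aux (k : Int) (cluster_result : List (Int × Int)) :
    groupPointsByCluster k cluster_result = groupPointsByCluster_alt k cluster_result := by
  unfold groupPointsByCluster groupPointsByCluster_alt
  congr 1
  apply pv_foldl_congr
  intro acc kth
  have hc : (pvBuckets cluster_result).contains kth =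
      cluster_result.any (fun pair => pair.2 == kth) := by
    simpa using pvBuckets_contains cluster_result PySem.Dict.empty kth
  have hg : (pvBuckets cluster_result).getD kth [] =
      cluster_result.filter (fun pair => pair.2 == kth) := by
    simpa using pvBuckets_getD cluster_result PySem.Dict.empty kth
  simp only [hc, hg]
  by_cases h : cluster_result.any (fun pair => pair.2 == kth) = true
  · have hne : (cluster_result.filter (fun pair => pair.2 == kth)).length ≠ 0 := by
      simp only [List.any_eq_true] at h
      obtain ⟨x, hx, hpx⟩ := h
      have : x ∈ cluster_result.filter (fun pair => pair.2 == kth) :=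
        List.mem_filter.mpr ⟨hx, hpx⟩
      intro hlen
      rw [List.length_eq_zero_iff] at hlen
      simp [hlen] at this
    simp [h, hne]
  · have he : cluster_result.filter (fun pair => pair.2 == kth) = [] := by
      rw [List.filter_eq_nil_iff]
      intro x hx
      simp only [List.any_eq_true, not_exists, not_and] at h
      exact fun hb => (h x hx) hb
    simp [h, he]

-- ===== VERDICT (by name: the statement is the Claim_ definition above) =====
theorem groupPointsByCluster_spec : Claim_equal_groupPointsByCluster := by
  intro k cluster_result _
  unfold Spec_groupPointsByCluster
  exact groupPointsByCluster_spec_aux k cluster_result
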